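-- pv_equiv track=rewrite | github.com/tsukumijima/marine-plus | marine/utils/post_process.py | _make_align_array
-- ===== SOURCE A (Python) =====
-- def _make_align_array(surfaces: list[str]) -> list[int]:
--     aligns = []
--     index = 0
--
--     while index < len(surfaces):
--         current_surface = surfaces[index]
--         blank_len = len(current_surface) - 1
--
--         boundary = [index + 1]
--         blank = [0] * blank_len if blank_len >= 1 else []
--
--         aligns = aligns + boundary + blank
--
--         index += 1
--
--     return aligns
-- ===== SOURCE B (Python) =====
-- def _make_align_array(surfaces: list[str]) -> list[int]:
--     marks = {}
--     pos = 0
--     for i, s in enumerate(surfaces):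
--         marks[pos] = i + 1
--         pos += max(len(s), 1)
--     return [marks.get(j, 0) for j in range(pos)]
-- ===== Notes on version B (the rewrite author's own statement) =====
-- stated objective: faster
-- what changed: Instead of concatenating per-token segments (aligns = aligns + boundary + blank), B first builds a dict mapping each boundary offset to its token number, then generates the output cell-by-cell with a lookup comprehension over range(total), avoiding A's quadratic repeated list concatenation.
import Mathlib
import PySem

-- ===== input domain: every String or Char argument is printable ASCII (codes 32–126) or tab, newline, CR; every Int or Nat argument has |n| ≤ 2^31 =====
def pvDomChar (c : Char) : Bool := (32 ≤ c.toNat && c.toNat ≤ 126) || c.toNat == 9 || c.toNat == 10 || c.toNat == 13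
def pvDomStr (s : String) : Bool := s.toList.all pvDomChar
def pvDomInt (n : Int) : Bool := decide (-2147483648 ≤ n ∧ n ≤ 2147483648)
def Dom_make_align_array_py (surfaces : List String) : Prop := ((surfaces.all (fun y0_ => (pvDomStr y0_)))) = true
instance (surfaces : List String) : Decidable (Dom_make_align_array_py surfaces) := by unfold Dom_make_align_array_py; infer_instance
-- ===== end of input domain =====

-- B builds a dict mapping each boundary offset to its token number, then generates the output
-- cell-by-cell by dict lookup over range(total) — a different decomposition from A's segment concatenation.

-- ===== PORT A =====
-- the while loop of A, recursing on index
def pvLoopA (surfaces : List String) (aligns : List Int) (index : Nat) : List Int :=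
  if h : index < surfaces.length then
    let current_surface := surfaces[index]
    let blank_len : Int := PySem.Str.len current_surface - 1
    let boundary : List Int := [(index : Int) + 1]
    let blank : List Int := if blank_len ≥ 1 then List.replicate blank_len.toNat 0 else []
    pvLoopA surfaces (aligns ++ boundary ++ blank) (index + 1)
  else aligns
termination_by surfaces.length - index

def make_align_array_py (surfaces : List String) : List Int :=
  pvLoopA surfaces [] 0

-- ===== PORT B =====
-- Source B: for i, s in enumerate(surfaces): marks[pos] = i + 1; pos += max(len(s), 1)
--       then [marks.get(j, 0) for j in range(pos)]
def make_align_array_py_alt (surfaces : List String) : List Int :=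
  let st := (PySem.List.enumerate surfaces 0).foldl
    (fun (st : PySem.Dict Int Int × Int) p =>
      (st.1.insert st.2 (p.1 + 1), st.2 + max (PySem.Str.len p.2) 1))
    (PySem.Dict.empty, 0)
  (PySem.List.pyRange 0 st.2 1).map (fun j => st.1.getD j 0)

-- ===== PRECONDITION & SPEC =====
def Spec_make_align_array_py (surfaces : List String) (out : List Int) : Prop := out = make_align_array_py_alt surfaces
instance (surfaces : List String) (out : List Int) : Decidable (Spec_make_align_array_py surfaces out) := by unfold Spec_make_align_array_py; infer_instance

-- ===== CLAIM (what is proved, stated in full; the proofs are below) =====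
def Claim_equal_make_align_array_py : Prop := ∀ (surfaces : List String), Dom_make_align_array_py surfaces → Spec_make_align_array_py surfaces (make_align_array_py surfaces)

-- ===== LEMMAS AND PROOFS =====

-- canonical result: for each surface, its boundary marker followed by len-1 zeros
def pvCanon : List String → Nat → List Int
  | [], _ => []
  | s :: rest, k => ((k : Int) + 1) :: (List.replicate (s.toList.length - 1) 0 ++ pvCanon rest (k + 1))

theorem pvLoopA_eq (surfaces : List String) : ∀ (index : Nat) (aligns : List Int),
    pvLoopA surfaces aligns index = aligns ++ pvCanon (surfaces.drop index) index := by
  intro index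
  induction hn : surfaces.length - index using Nat.strong_induction_on generalizing index with
  | _ n ih =>
    intro aligns
    rw [pvLoopA]
    by_cases h : index < surfaces.length
    · simp only [h, dif_pos]
      have hdrop : surfaces.drop index = surfaces[index] :: surfaces.drop (index + 1) := by
        rw [List.drop_eq_getElem_cons h]
      rw [ih (surfaces.length - (index + 1)) (by omega) (index + 1) rfl]
      rw [hdrop]
      simp only [pvCanon, PySem.Str.len_eq]
      have hblank : (if ((surfaces[index].toList.length : Int) - 1) ≥ 1 then
          List.replicate ((surfaces[index].toList.length : Int) - 1).toNat (0 : Int) else [])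
          = List.replicate (surfaces[index].toList.length - 1) 0 := by
        by_cases h2 : ((surfaces[index].toList.length : Int) - 1) ≥ 1
        · rw [if_pos h2]; congr 1; omega
        · rw [if_neg h2]
          have : surfaces[index].toList.length - 1 = 0 := by omega
          rw [this]; rfl
      rw [hblank]
      simp
    · simp only [h, dif_neg, not_false_iff]
      rw [List.drop_of_length_le (by omega)]
      simp [pvCanon]

-- total contribution length of B's loop
def pvTotal : List String → Int
  | [] => 0
  | s :: rest => max (PySem.Str.len s) 1 + pvTotal rest

theorem pvTotal_nonneg (surfaces : List String) : 0 ≤ pvTotal surfaces := by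
  induction surfaces with
  | nil => simp [pvTotal]
  | cons s rest ih =>
    have := PySem.Str.len_eq s
    simp only [pvTotal]
    omega

-- the value the final dict holds at position j (none = not a boundary written by the loop)
def pvLook : List String → Nat → Int → Int → Option Int
  | [], _, _, _ => none
  | s :: rest, k, p, j =>
    match pvLook rest (k + 1) (p + max (PySem.Str.len s) 1) j with
    | some v => some v
    | none => if j = p then some ((k : Int) + 1) else none

theorem pvLook_none_of_lt (surfaces : List String) : ∀ (k : Nat) (p j : Int), j < p →
    pvLook surfaces k p j = none := by
  induction surfaces with
  | nil => intro k p j _; rfl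
  | cons s rest ih =>
    intro k p j hj
    have hlen := PySem.Str.len_eq s
    have : pvLook rest (k + 1) (p + max (PySem.Str.len s) 1) j = none := by
      apply ih; omega
    simp only [pvLook, this]
    rw [if_neg (by omega)]

-- B's fold: final position and pointwise dict contents
theorem pvFoldB_eq (surfaces : List String) : ∀ (k : Nat) (d : PySem.Dict Int Int) (p : Int),
    ((PySem.List.enumerate surfaces (k : Int)).foldl
      (fun (st : PySem.Dict Int Int × Int) q =>
        (st.1.insert st.2 (q.1 + 1), st.2 + max (PySem.Str.len q.2) 1)) (d, p)).2
      = p + pvTotal surfaces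
    ∧ ∀ j : Int,
      (((PySem.List.enumerate surfaces (k : Int)).foldl
        (fun (st : PySem.Dict Int Int × Int) q =>
          (st.1.insert st.2 (q.1 + 1), st.2 + max (PySem.Str.len q.2) 1)) (d, p)).1).getD j 0
      = (pvLook surfaces k p j).getD (d.getD j 0) := by
  induction surfaces with
  | nil =>
    intro k d p
    simp [PySem.List.enumerate_nil, pvTotal, pvLook]
  | cons s rest ih =>
    intro k d p
    rw [PySem.List.enumerate_cons]
    simp only [List.foldl_cons]
    have hcast : (k : Int) + 1 = ((k + 1 : Nat) : Int) := by push_cast; ring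
    rw [hcast]
    obtain ⟨h2, h1⟩ := ih (k + 1) (d.insert p ((k : Int) + 1)) (p + max (PySem.Str.len s) 1)
    rw [hcast] at h2 h1
    constructor
    · rw [h2]; simp only [pvTotal]; ring
    · intro j
      rw [h1 j]
      simp only [pvLook]
      cases hl : pvLook rest (k + 1) (p + max (PySem.Str.len s) 1) j with
      | some v => simp
      | none =>
        simp only [Option.getD_none]
        rw [PySem.Dict.getD_insert]
        by_cases hj : j = p
        · simp [hj]
        · simp [hj]

-- the lookup comprehension over the range reproduces the canonical array
theorem pvMapB (surfaces : List String) : ∀ (k : Nat) (p : Int),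
    (PySem.List.pyRange p (p + pvTotal surfaces) 1).map (fun j => (pvLook surfaces k p j).getD 0)
      = pvCanon surfaces k := by
  induction surfaces with
  | nil =>
    intro k p
    rw [show p + pvTotal [] = p by simp [pvTotal]]
    rw [PySem.List.pyRange_one_eq_nil (by omega)]
    rfl
  | cons s rest ih =>
    intro k p
    have hlen := PySem.Str.len_eq s
    have htot := pvTotal_nonneg rest
    set L : Int := max (PySem.Str.len s) 1 with hL
    have hL1 : 1 ≤ L := by omega
    have hsplit : PySem.List.pyRange p (p + pvTotal (s :: rest)) 1
        = PySem.List.pyRange p (p + L) 1 ++ PySem.List.pyRange (p + L) (p + pvTotal (s :: rest)) 1 := by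
      apply PySem.List.pyRange_one_append
      · omega
      · simp only [pvTotal, ← hL]; omega
    rw [hsplit, List.map_append]
    have hhead : PySem.List.pyRange p (p + L) 1 = p :: PySem.List.pyRange (p + 1) (p + L) 1 :=
      PySem.List.pyRange_one_cons (by omega)
    rw [hhead, List.map_cons]
    -- the boundary cell
    have hatp : (pvLook (s :: rest) k p p).getD 0 = (k : Int) + 1 := by
      simp only [pvLook]
      rw [pvLook_none_of_lt rest (k + 1) (p + L) p (by omega)]
      simp
    rw [hatp]
    -- blanks: cells strictly between p and p + L are 0
    have hblanks : (PySem.List.pyRange (p + 1) (p + L) 1).map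
        (fun j => (pvLook (s :: rest) k p j).getD 0)
        = List.replicate (s.toList.length - 1) 0 := by
      have hc : ∀ j ∈ PySem.List.pyRange (p + 1) (p + L) 1,
          (pvLook (s :: rest) k p j).getD 0 = (0 : Int) := by
        intro j hj
        rw [PySem.List.mem_pyRange_one] at hj
        simp only [pvLook]
        rw [pvLook_none_of_lt rest (k + 1) (p + L) j (by omega)]
        simp only []
        rw [if_neg (by omega)]
        rfl
      rw [List.map_congr_left hc, List.map_const']
      rw [PySem.List.length_pyRange_one]
      congr 1
      omega
    rw [hblanks]
    -- the tail: cells ≥ p + L read through to the rest's dict entries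
    have htail : (PySem.List.pyRange (p + L) (p + pvTotal (s :: rest)) 1).map
        (fun j => (pvLook (s :: rest) k p j).getD 0)
        = (PySem.List.pyRange (p + L) ((p + L) + pvTotal rest) 1).map
          (fun j => (pvLook rest (k + 1) (p + L) j).getD 0) := by
      rw [show p + pvTotal (s :: rest) = (p + L) + pvTotal rest by simp only [pvTotal, ← hL]; ring]
      apply List.map_congr_left
      intro j hj
      rw [PySem.List.mem_pyRange_one] at hj
      simp only [pvLook]
      cases hl : pvLook rest (k + 1) (p + L) j with
      | some v => simp
      | none =>
        simp only [Option.getD_none]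
        rw [if_neg (by omega)]
        rfl
    rw [htail, ih (k + 1) (p + L)]
    simp [pvCanon]

-- ===== VERDICT (by name: the statement is the Claim_ definition above) =====
theorem make_align_array_py_spec : Claim_equal_make_align_array_py := by
  intro surfaces _
  unfold Spec_make_align_array_py make_align_array_py
  rw [pvLoopA_eq surfaces 0 []]
  simp only [make_align_array_py_alt]
  obtain ⟨h2, h1⟩ := pvFoldB_eq surfaces 0 PySem.Dict.empty 0
  simp only [Nat.cast_zero] at h2 h1
  rw [h2]
  have hmap : ∀ j : Int,
      (((PySem.List.enumerate surfaces 0).foldl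
        (fun (st : PySem.Dict Int Int × Int) q =>
          (st.1.insert st.2 (q.1 + 1), st.2 + max (PySem.Str.len q.2) 1)) (PySem.Dict.empty, 0)).1).getD j 0
      = (pvLook surfaces 0 0 j).getD 0 := by
    intro j
    rw [h1 j]
    simp [PySem.Dict.getD_empty]
  rw [List.map_congr_left (fun j _ => hmap j)]
  have := pvMapB surfaces 0 0
  simp only [zero_add] at this ⊢
  rw [this]
  simp
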